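-- pv_equiv track=rewrite | github.com/chengting0906os/neetcode-submissions-7bevs29q | Data Structures & Algorithms/longest-increasing-subsequence/submission-8.py | my_bisect_left
-- ===== SOURCE A (Python) =====
-- from typing import List
--
-- def my_bisect_left(my_list: List[int], num: int) -> int:
--     l = 0
--     r = len(my_list)
--
--     while l < r:
--         mid = l + (r - l) // 2
--         if my_list[mid] < num:
--             l = mid + 1
--         else:
--             r = mid
--
--     return l
-- ===== SOURCE B (Python) =====
-- def my_bisect_left(my_list, num):
--     # Divide and conquer on slices: recurse into the half that can contain the
--     # leftmost insertion point, adding the offset of the right half.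
--     if not my_list:
--         return 0
--     mid = len(my_list) // 2
--     if my_list[mid] < num:
--         return mid + 1 + my_bisect_left(my_list[mid + 1:], num)
--     else:
--         return my_bisect_left(my_list[:mid], num)
-- ===== Notes on version B (the rewrite author's own statement) =====
-- stated objective: alternative
-- what changed: The iterative two-pointer while loop over indices (l, r) is replaced by a divide-and-conquer recursion on list slices that returns an offset for the discarded left half.
import Mathlib
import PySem

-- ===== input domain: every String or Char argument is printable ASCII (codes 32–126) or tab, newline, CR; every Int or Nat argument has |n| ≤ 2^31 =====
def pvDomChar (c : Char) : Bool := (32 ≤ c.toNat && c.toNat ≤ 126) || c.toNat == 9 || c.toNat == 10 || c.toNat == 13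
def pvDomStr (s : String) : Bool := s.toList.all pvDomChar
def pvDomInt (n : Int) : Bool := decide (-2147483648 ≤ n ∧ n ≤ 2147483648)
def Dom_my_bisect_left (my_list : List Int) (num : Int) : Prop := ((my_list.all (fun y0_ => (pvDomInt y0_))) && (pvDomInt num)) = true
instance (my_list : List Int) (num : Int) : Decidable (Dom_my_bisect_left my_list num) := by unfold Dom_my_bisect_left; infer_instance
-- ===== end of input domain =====

-- B replaces A's iterative two-pointer while loop over indices by a divide-and-conquer
-- recursion on list slices (objective: alternative decomposition, same cost in comparisons).

-- ===== PORT A =====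
-- the while loop of A, step for step; `getD _ 0` is my_list[mid]: whenever the loop
-- reads it we have l ≤ mid < r ≤ my_list.length, so the index is always in range
def pvLoopA (xs : List Int) (num : Int) (l r : Nat) : Nat :=
  if l < r then
    if xs.getD (l + (r - l) / 2) 0 < num then
      pvLoopA xs num (l + (r - l) / 2 + 1) r
    else
      pvLoopA xs num l (l + (r - l) / 2)
  else l
termination_by r - l
decreasing_by all_goals omega

def my_bisect_left (my_list : List Int) (num : Int) : Int :=
  (pvLoopA my_list num 0 my_list.length : Int)

-- ===== PORT B =====
-- Source B's recursion on slices: my_list[mid+1:] is List.drop (mid+1), my_list[:mid] is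
-- List.take mid (both bounds are nonnegative, where Python slicing equals take/drop);
-- `getD _ 0` is my_list[mid], in range since the list is nonempty and mid < length
def pvBisRec (xs : List Int) (num : Int) : Nat :=
  if xs.length = 0 then 0
  else if xs.getD (xs.length / 2) 0 < num then
    xs.length / 2 + 1 + pvBisRec (xs.drop (xs.length / 2 + 1)) num
  else
    pvBisRec (xs.take (xs.length / 2)) num
termination_by xs.length
decreasing_by all_goals (simp [List.length_drop, List.length_take]; omega)

def my_bisect_left_alt (my_list : List Int) (num : Int) : Int :=
  (pvBisRec my_list num : Int)

-- ===== PRECONDITION & SPEC =====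
def Spec_my_bisect_left (my_list : List Int) (num : Int) (out : Int) : Prop := out = my_bisect_left_alt my_list num
instance (my_list : List Int) (num : Int) (out : Int) : Decidable (Spec_my_bisect_left my_list num out) := by unfold Spec_my_bisect_left; infer_instance

-- ===== CLAIM (what is proved, stated in full; the proofs are below) =====
def Claim_equal_my_bisect_left : Prop := ∀ (my_list : List Int) (num : Int), Dom_my_bisect_left my_list num → Spec_my_bisect_left my_list num (my_bisect_left my_list num)

-- ===== LEMMAS AND PROOFS =====

-- loop invariant: A's loop on window [l, r) equals l plus B's recursion on the slice xs[l:r]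
lemma pvLoopA_eq_bisRec (xs : List Int) (num : Int) :
    ∀ n l r, r - l = n → l ≤ r → r ≤ xs.length →
      pvLoopA xs num l r = l + pvBisRec ((xs.drop l).take (r - l)) num := by
  intro n
  induction n using Nat.strong_induction_on with
  | _ n ih =>
    intro l r hn hlr hrlen
    rw [pvLoopA]
    by_cases h : l < r
    · have hslen : ((xs.drop l).take (r - l)).length = r - l := by
        simp [List.length_take, List.length_drop]; omega
      have hm : (r - l) / 2 < r - l := by omega
      have hget : ((xs.drop l).take (r - l)).getD ((r - l) / 2) 0
          = xs.getD (l + (r - l) / 2) 0 := by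
        simp [List.getD_eq_getElem?_getD, List.getElem?_drop, hm]
      rw [pvBisRec, hslen, hget]
      simp only [h, if_true]
      have hne : ¬ (r - l = 0) := by omega
      rw [if_neg hne]
      by_cases hc : xs.getD (l + (r - l) / 2) 0 < num
      · simp only [hc, if_true]
        rw [ih (r - (l + (r - l) / 2 + 1)) (by omega) (l + (r - l) / 2 + 1) r rfl
              (by omega) hrlen]
        have hdrop : ((xs.drop l).take (r - l)).drop ((r - l) / 2 + 1)
            = (xs.drop (l + (r - l) / 2 + 1)).take (r - (l + (r - l) / 2 + 1)) := by
          rw [List.drop_take, List.drop_drop]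
          congr 1
          omega
        rw [hdrop]; omega
      · simp only [hc, if_false]
        rw [ih ((l + (r - l) / 2) - l) (by omega) l (l + (r - l) / 2) rfl (by omega)
              (by omega)]
        have htake : ((xs.drop l).take (r - l)).take ((r - l) / 2)
            = (xs.drop l).take ((l + (r - l) / 2) - l) := by
          rw [List.take_take]
          congr 1; omega
        rw [htake]
    · have : l = r := by omega
      subst this
      rw [pvBisRec]
      simp

-- ===== VERDICT (by name: the statement is the Claim_ definition above) =====
theorem my_bisect_left_spec : Claim_equal_my_bisect_left := by
  intro my_list num _
  unfold Spec_my_bisect_left my_bisect_left my_bisect_left_alt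
  rw [pvLoopA_eq_bisRec my_list num my_list.length 0 my_list.length rfl (by omega) le_rfl]
  simp
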